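-- pv_equiv track=rewrite | github.com/annafleming/Python-Training | Python Primer/exercises/projects.py | _change_generator
-- ===== SOURCE A (Python) =====
-- def _change_generator(charged, given):
--     bills = [100, 50, 20, 10, 5, 1]
--     left = given - charged
--     for bill in bills:
--         if not left:
--             break
--         while left >= bill:
--             yield bill
--             left -= bill
-- ===== SOURCE B (Python) =====
-- def _change_generator(charged, given):
--     left = given - charged
--     if left > 0:
--         yield from [100] * (left // 100)
--         yield from [50] * (left % 100 // 50)
--         yield from [20] * (left % 50 // 20)
--         yield from [10] * (left % 50 % 20 // 10)
--         yield from [5] * (left % 50 % 20 % 10 // 5)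
--         yield from [1] * (left % 50 % 20 % 10 % 5)
-- ===== Notes on version B (the rewrite author's own statement) =====
-- stated objective: simpler
-- what changed: Replaces A's nested loops (for over denominations with a repeated-subtraction while) by a loop-free closed form: each denomination's count is an independent division/remainder expression and the bills are emitted as six replicated lists.
import Mathlib
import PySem

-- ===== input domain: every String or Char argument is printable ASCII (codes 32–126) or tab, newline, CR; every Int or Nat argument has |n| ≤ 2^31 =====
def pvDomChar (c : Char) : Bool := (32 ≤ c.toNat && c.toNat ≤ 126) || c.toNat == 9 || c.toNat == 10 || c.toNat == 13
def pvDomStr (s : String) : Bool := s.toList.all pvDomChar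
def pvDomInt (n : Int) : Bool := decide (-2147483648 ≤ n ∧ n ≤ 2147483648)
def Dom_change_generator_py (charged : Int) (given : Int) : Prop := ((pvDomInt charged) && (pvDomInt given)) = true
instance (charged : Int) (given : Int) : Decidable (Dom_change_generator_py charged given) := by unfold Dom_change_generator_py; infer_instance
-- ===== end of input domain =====

-- B replaces A's nested loops (for over denominations + repeated-subtraction while)
-- by a loop-free closed form: each denomination's count is an independent
-- division/remainder expression, emitted as six replicated lists.
-- ===== PORT A =====
-- inner 'while left >= bill: yield bill; left -= bill' (terminates since each bill ≥ 1)
def pvWhileA (bill left : Int) : List Int × Int :=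
  if _h : 1 ≤ bill ∧ bill ≤ left then
    let r := pvWhileA bill (left - bill)
    (bill :: r.1, r.2)
  else ([], left)
termination_by left.toNat
decreasing_by omega

-- 'for bill in bills: if not left: break; <while loop>'
def pvForA (left : Int) : List Int → List Int
  | [] => []
  | bill :: rest =>
      if left = 0 then []
      else
        let r := pvWhileA bill left
        r.1 ++ pvForA r.2 rest

def change_generator_py (charged : Int) (given : Int) : List Int :=
  pvForA (given - charged) [100, 50, 20, 10, 5, 1]

-- ===== PORT B =====
def change_generator_py_alt (charged : Int) (given : Int) : List Int :=
  let left := given - charged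
  if 0 < left then
    List.replicate (PySem.Int.floordiv left 100).toNat 100 ++
    List.replicate (PySem.Int.floordiv (PySem.Int.mod left 100) 50).toNat 50 ++
    List.replicate (PySem.Int.floordiv (PySem.Int.mod left 50) 20).toNat 20 ++
    List.replicate (PySem.Int.floordiv (PySem.Int.mod (PySem.Int.mod left 50) 20) 10).toNat 10 ++
    List.replicate (PySem.Int.floordiv (PySem.Int.mod (PySem.Int.mod (PySem.Int.mod left 50) 20) 10) 5).toNat 5 ++
    List.replicate (PySem.Int.mod (PySem.Int.mod (PySem.Int.mod (PySem.Int.mod left 50) 20) 10) 5).toNat 1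
  else []

-- ===== PRECONDITION & SPEC =====
def Spec_change_generator_py (charged : Int) (given : Int) (out : List Int) : Prop := out = change_generator_py_alt charged given
instance (charged : Int) (given : Int) (out : List Int) : Decidable (Spec_change_generator_py charged given out) := by unfold Spec_change_generator_py; infer_instance

-- ===== CLAIM (what is proved, stated in full; the proofs are below) =====
def Claim_equal_change_generator_py : Prop := ∀ (charged : Int) (given : Int), Dom_change_generator_py charged given → Spec_change_generator_py charged given (change_generator_py charged given)

-- ===== LEMMAS AND PROOFS =====
theorem pvWhileA_run (bill left : Int) (hb : 1 ≤ bill) (hl : 0 ≤ left) :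
    pvWhileA bill left = (List.replicate (left / bill).toNat bill, left % bill) := by
  unfold pvWhileA
  split_ifs with h
  · have h2 : 0 ≤ left - bill := by omega
    have ih := pvWhileA_run bill (left - bill) hb h2
    rw [ih]
    have key : left / bill = (left - bill) / bill + 1 := by
      have := Int.add_mul_ediv_right (left - bill) 1 (show bill ≠ 0 by omega)
      simp at this; omega
    have nn : 0 ≤ (left - bill) / bill := Int.ediv_nonneg h2 (by omega)
    have hT : (left / bill).toNat = ((left - bill) / bill).toNat + 1 := by omega
    have hm : (left - bill) % bill = left % bill := Int.sub_emod_right left bill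
    simp [hT, hm, List.replicate_succ]
  · have hlt : left < bill := by omega
    simp [Int.ediv_eq_zero_of_lt hl hlt, Int.emod_eq_of_lt hl hlt]
termination_by left.toNat
decreasing_by omega

theorem pvForA_zero (bills : List Int) : pvForA 0 bills = [] := by
  cases bills <;> simp [pvForA]

theorem pvForA_cons (bill : Int) (rest : List Int) (left : Int)
    (hb : 1 ≤ bill) (hl : 0 ≤ left) :
    pvForA left (bill :: rest) =
      List.replicate (left / bill).toNat bill ++ pvForA (left % bill) rest := by
  by_cases h0 : left = 0
  · subst h0
    simp [pvForA, pvForA_zero]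
  · simp only [pvForA, if_neg h0]
    rw [pvWhileA_run bill left hb hl]

theorem pvWhileA_nonpos (bill left : Int) (hb : 1 ≤ bill) (hl : left < 0) :
    pvWhileA bill left = ([], left) := by
  unfold pvWhileA
  rw [dif_neg (by omega)]

theorem pvForA_neg (bills : List Int) (left : Int) (hb : ∀ b ∈ bills, 1 ≤ b) (hl : left < 0) :
    pvForA left bills = [] := by
  induction bills with
  | nil => rfl
  | cons bill rest ih =>
      have hb1 : 1 ≤ bill := hb bill (by simp)
      simp only [pvForA]
      rw [if_neg (by omega), pvWhileA_nonpos bill left hb1 hl]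
      simpa using ih (fun b h => hb b (by simp [h]))

theorem change_generator_py_spec : Claim_equal_change_generator_py := by
  intro charged given _
  unfold Spec_change_generator_py change_generator_py change_generator_py_alt
  set left := given - charged with hleft
  by_cases hpos : 0 < left
  · rw [if_pos hpos]
    have h0 : (0:Int) ≤ left := le_of_lt hpos
    rw [pvForA_cons 100 _ left (by norm_num) h0,
        pvForA_cons 50 _ _ (by norm_num) (Int.emod_nonneg _ (by norm_num)),
        pvForA_cons 20 _ _ (by norm_num) (Int.emod_nonneg _ (by norm_num)),
        pvForA_cons 10 _ _ (by norm_num) (Int.emod_nonneg _ (by norm_num)),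
        pvForA_cons 5 _ _ (by norm_num) (Int.emod_nonneg _ (by norm_num)),
        pvForA_cons 1 _ _ (by norm_num) (Int.emod_nonneg _ (by norm_num))]
    have ezf : left % 100 % 50 % 20 % 10 % 5 % 1 = 0 := by omega
    rw [ezf, pvForA_zero]
    rw [PySem.Int.floordiv_eq_ediv_of_pos (by norm_num : (0:Int) < 100),
        PySem.Int.floordiv_eq_ediv_of_pos (by norm_num : (0:Int) < 50),
        PySem.Int.floordiv_eq_ediv_of_pos (by norm_num : (0:Int) < 20),
        PySem.Int.floordiv_eq_ediv_of_pos (by norm_num : (0:Int) < 10),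
        PySem.Int.floordiv_eq_ediv_of_pos (by norm_num : (0:Int) < 5)]
    simp only [PySem.Int.mod_eq_emod_of_pos (by norm_num : (0:Int) < 100),
      PySem.Int.mod_eq_emod_of_pos (by norm_num : (0:Int) < 50),
      PySem.Int.mod_eq_emod_of_pos (by norm_num : (0:Int) < 20),
      PySem.Int.mod_eq_emod_of_pos (by norm_num : (0:Int) < 10),
      PySem.Int.mod_eq_emod_of_pos (by norm_num : (0:Int) < 5)]
    have e1 : left % 100 % 50 = left % 50 := by omega
    have e2 : left % 50 % 20 % 10 % 5 / 1 = left % 50 % 20 % 10 % 5 := Int.ediv_one _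
    rw [e1, e2]
    simp [List.append_assoc]
  · rw [if_neg hpos]
    rcases lt_or_eq_of_le (not_lt.mp hpos) with hlt | heq
    · exact pvForA_neg _ _ (by intro b hb; fin_cases hb <;> norm_num) hlt
    · rw [heq, pvForA_zero]
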